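-- pv_equiv track=rewrite | github.com/gritmind/semantic-annotation | jupyter-notebook/feature_design_for_spaCy.py | numbering_which_ppchunk
-- ===== SOURCE A (Python) =====
-- def numbering_which_ppchunk(ppchunk_numbered_sent, spacy_sent):
--
--     # make prep lookup table
--     prep_list = ['for','to','into','with','upon','of','as','by','on','in','unknown']
--     prep_lookup_table = make_lookup_table(prep_list)
--
--
--     # init feature vector per token
--     feature_2d = []
--     whichprep_sent = [0] * len(ppchunk_numbered_sent)
--
--
--     for i, num_ in enumerate(ppchunk_numbered_sent):
--
--         # first token
--         if i == 0 and ppchunk_numbered_sent[i+1] !=0: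
--             if str(spacy_sent[i]) in prep_list:
--                 whichprep_sent[i] = prep_lookup_table[str(spacy_sent[i])]+1
--             else:
--                 whichprep_sent[i] = prep_lookup_table['unknown']+1
--
--         # not first token
--         if i !=0 and num_ !=0 and ppchunk_numbered_sent[i] != ppchunk_numbered_sent[i-1]: # 전치사위치: 배열의 마지막 token이 아니고, 숫자0이 아니고, 전(t-1) token과 현재(t) token이 다를 때..
--
--
--             if str(spacy_sent[i]) in prep_list:
--                 whichprep_sent[i] = prep_lookup_table[str(spacy_sent[i])]+1
--             else:
--                 whichprep_sent[i] = prep_lookup_table['unknown']+1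
--
--             #try:
--             #    whichprep_sent[i] = prep_lookup_table[spacy_sent[i]]+1
--             #except KeyError:
--             #    whichprep_sent[i] = prep_lookup_table['unknown']+1
--
--             #whichprep_sent[i] = prep_lookup_table[spacy_sent[i]]
--
--     for i, num_ in enumerate(whichprep_sent):
--
--         if num_ != 0:
--
--             for j in range(i, len(whichprep_sent)):
--                 if not j == len(whichprep_sent)-1:
--                     if ppchunk_numbered_sent[j] == ppchunk_numbered_sent[j+1]:
--                         whichprep_sent[j] = num_
--                         whichprep_sent[j+1] = num_
--                     else:
--                         break
--
--
--     # make 2d array...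
--     for i, num_ in enumerate(whichprep_sent):
--         whichprep_feature = [0] * len(prep_lookup_table)
--         if num_ == 0:
--             feature_2d.append(whichprep_feature)
--         else:
--             idx = num_ - 1
--             whichprep_feature[idx] = 1
--             feature_2d.append(whichprep_feature)
--
--     return feature_2d
--
-- def make_lookup_table(list_):
--     lookup_table = {}
--     for i, token in enumerate(list_):
--         lookup_table[token] = i
--     return lookup_table
-- ===== SOURCE B (Python) =====
-- def numbering_which_ppchunk(ppchunk_numbered_sent, spacy_sent):
--     # Single linear pass: at each chunk-run start decide the prep number once,
--     # then propagate it across the contiguous run while emitting one-hot rows.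
--     prep_list = ['for','to','into','with','upon','of','as','by','on','in','unknown']
--     n = len(ppchunk_numbered_sent)
--     feature_2d = []
--     cur = 0  # prep number (1..11) of the current run, 0 = no prep feature
--     for k in range(n):
--         if not (k > 0 and ppchunk_numbered_sent[k] == ppchunk_numbered_sent[k - 1]):
--             # a new run starts at k: is it a prep-headed position?
--             if (k == 0 and n > 1 and ppchunk_numbered_sent[1] != 0) or \
--                (k > 0 and ppchunk_numbered_sent[k] != 0):
--                 tok = str(spacy_sent[k])
--                 cur = (prep_list.index(tok) if tok in prep_list else 10) + 1
--             else:
--                 cur = 0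
--         vec = [0] * 11
--         if cur != 0:
--             vec[cur - 1] = 1
--         feature_2d.append(vec)
--     return feature_2d
-- ===== Notes on version B (the rewrite author's own statement) =====
-- stated objective: faster
-- what changed: B replaces A's lookup-dict plus three passes (mark prep positions, then for every nonzero cell re-propagate it forward across its chunk run, then build one-hot rows) by a single left-to-right pass that decides the prep number once at each chunk-run start, carries it in an accumulator across the run, and emits each one-hot row directly.
import Mathlib
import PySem

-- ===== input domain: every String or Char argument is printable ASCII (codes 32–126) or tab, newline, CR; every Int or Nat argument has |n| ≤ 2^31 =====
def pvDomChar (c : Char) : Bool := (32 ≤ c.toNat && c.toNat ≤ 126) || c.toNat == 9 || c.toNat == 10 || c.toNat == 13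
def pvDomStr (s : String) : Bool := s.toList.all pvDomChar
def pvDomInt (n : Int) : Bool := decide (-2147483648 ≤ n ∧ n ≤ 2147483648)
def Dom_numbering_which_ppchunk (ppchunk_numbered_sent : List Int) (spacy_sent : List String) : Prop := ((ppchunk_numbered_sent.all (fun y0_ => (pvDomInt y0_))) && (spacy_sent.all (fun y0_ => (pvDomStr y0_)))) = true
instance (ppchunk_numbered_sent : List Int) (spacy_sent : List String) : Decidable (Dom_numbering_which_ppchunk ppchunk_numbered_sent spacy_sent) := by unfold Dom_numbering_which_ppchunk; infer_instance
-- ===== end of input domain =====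

-- B replaces A's quadratic re-propagation loops by one linear pass that carries the
-- current chunk-run's prep number in an accumulator (objective: faster, asymptotic).

-- ===== PORT A =====
def pvPrepList : List String :=
  ["for", "to", "into", "with", "upon", "of", "as", "by", "on", "in", "unknown"]

-- make_lookup_table: dict built by enumerate-insert
def make_lookup_table (list_ : List String) : PySem.Dict String Int :=
  (PySem.List.enumerate list_).foldl (fun d p => d.insert p.2 p.1) PySem.Dict.empty

-- first loop of A: mark prep positions in whichprep_sent (recursion over the list with
-- an index counter = 'for i, num_ in enumerate(...)'; pyGetD is exact here — Pre_
-- excludes the IndexError inputs, where Python raises)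
def pvLoop1 (pp : List Int) (spacy : List String) (tbl : PySem.Dict String Int) :
    List Int → Nat → List Int → List Int
  | [], _, w => w
  | num :: rest, i, w =>
    let w1 :=
      if i = 0 ∧ PySem.List.pyGetD pp ((i + 1 : Nat) : Int) 0 ≠ 0 then
        (if pvPrepList.contains (PySem.List.pyGetD spacy (i : Int) "") then
          PySem.List.pySetD w (i : Int)
            (tbl.getD (PySem.List.pyGetD spacy (i : Int) "") 0 + 1)
        else
          PySem.List.pySetD w (i : Int) (tbl.getD "unknown" 0 + 1))
      else w
    let w2 :=
      if i ≠ 0 ∧ num ≠ 0 ∧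
          PySem.List.pyGetD pp (i : Int) 0 ≠ PySem.List.pyGetD pp ((i - 1 : Nat) : Int) 0 then
        (if pvPrepList.contains (PySem.List.pyGetD spacy (i : Int) "") then
          PySem.List.pySetD w1 (i : Int)
            (tbl.getD (PySem.List.pyGetD spacy (i : Int) "") 0 + 1)
        else
          PySem.List.pySetD w1 (i : Int) (tbl.getD "unknown" 0 + 1))
      else w1
    pvLoop1 pp spacy tbl rest (i + 1) w2

-- inner 'for j in range(i, len)' propagation loop of A (n = len(whichprep_sent), fixed)
def pvFill (pp : List Int) (n : Nat) (num : Int) : Nat → List Int → List Int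
  | j, w =>
    if _h : j < n then
      if j = n - 1 then pvFill pp n num (j + 1) w
      else if PySem.List.pyGetD pp (j : Int) 0 = PySem.List.pyGetD pp ((j + 1 : Nat) : Int) 0 then
        pvFill pp n num (j + 1)
          (PySem.List.pySetD (PySem.List.pySetD w (j : Int) num) ((j + 1 : Nat) : Int) num)
      else w
    else w
  termination_by j _ => n - j

-- second loop of A: 'for i, num_ in enumerate(whichprep_sent)' over the list it mutates;
-- CPython's list iterator reads the CURRENT cell at each step, hence the re-read w[i]
def pvLoop2 (pp : List Int) (n : Nat) : Nat → List Int → List Int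
  | i, w =>
    if _h : i < n then
      pvLoop2 pp n (i + 1)
        (if PySem.List.pyGetD w (i : Int) 0 ≠ 0 then
          pvFill pp n (PySem.List.pyGetD w (i : Int) 0) i w
        else w)
    else w
  termination_by i _ => n - i

-- third loop of A: one-hot rows
def pvLoop3 (tbl : PySem.Dict String Int) (w : List Int) : List (List Int) :=
  (PySem.List.enumerate w).foldl
    (fun acc p =>
      let feat := List.replicate tbl.size (0 : Int)
      if p.2 = 0 then acc ++ [feat]
      else acc ++ [PySem.List.pySetD feat (p.2 - 1) 1])
    []

def numbering_which_ppchunk (ppchunk_numbered_sent : List Int) (spacy_sent : List String) :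
    List (List Int) :=
  let tbl := make_lookup_table pvPrepList
  let w1 := pvLoop1 ppchunk_numbered_sent spacy_sent tbl ppchunk_numbered_sent 0
    (List.replicate ppchunk_numbered_sent.length 0)
  let w2 := pvLoop2 ppchunk_numbered_sent ppchunk_numbered_sent.length 0 w1
  pvLoop3 tbl w2

-- ===== PORT B =====
-- loop body of B: one token k; carry (cur, feature_2d) as the fold state
def pvAltStep (pp : List Int) (spacy : List String) (n : Nat)
    (st : Int × List (List Int)) (k : Nat) : Int × List (List Int) :=
  let cur :=
    if ¬ (0 < k ∧ PySem.List.pyGetD pp (k : Int) 0 =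
            PySem.List.pyGetD pp ((k - 1 : Nat) : Int) 0) then
      if (k = 0 ∧ 1 < n ∧ PySem.List.pyGetD pp ((1 : Nat) : Int) 0 ≠ 0) ∨
          (0 < k ∧ PySem.List.pyGetD pp (k : Int) 0 ≠ 0) then
        let tok := PySem.List.pyGetD spacy (k : Int) ""
        (if (["for", "to", "into", "with", "upon", "of", "as", "by", "on", "in",
              "unknown"] : List String).contains tok then
          (((PySem.List.index?
              ["for", "to", "into", "with", "upon", "of", "as", "by", "on", "in",
                "unknown"] tok).getD 0 : Nat) : Int)
        else 10) + 1
      else 0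
    else st.1
  let vec := List.replicate 11 (0 : Int)
  let vec := if cur ≠ 0 then PySem.List.pySetD vec (cur - 1) 1 else vec
  (cur, st.2 ++ [vec])

def numbering_which_ppchunk_alt (ppchunk_numbered_sent : List Int) (spacy_sent : List String) :
    List (List Int) :=
  ((List.range ppchunk_numbered_sent.length).foldl
    (pvAltStep ppchunk_numbered_sent spacy_sent ppchunk_numbered_sent.length)
    ((0 : Int), ([] : List (List Int)))).2

-- ===== PRECONDITION & SPEC =====
-- positions where A reads spacy_sent[i] (prep-marked positions), from the inputs alone
def pvIsPrepPos (pp : List Int) (i : Nat) : Bool :=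
  (i == 0 && decide (1 < pp.length) && pp.getD 1 0 != 0) ||
    (decide (0 < i) && pp.getD i 0 != 0 && pp.getD i 0 != pp.getD (i - 1) 0)

-- Pre_ excludes exactly the inputs where Python A raises IndexError: a length-1
-- ppchunk list (A reads ppchunk[1] for the first token), and prep-marked positions
-- beyond the end of spacy_sent.
def Pre_numbering_which_ppchunk (ppchunk_numbered_sent : List Int) (spacy_sent : List String) : Prop :=
  ppchunk_numbered_sent.length ≠ 1 ∧
    ∀ i < ppchunk_numbered_sent.length,
      pvIsPrepPos ppchunk_numbered_sent i = true → i < spacy_sent.length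

instance (ppchunk_numbered_sent : List Int) (spacy_sent : List String) :
    Decidable (Pre_numbering_which_ppchunk ppchunk_numbered_sent spacy_sent) := by
  unfold Pre_numbering_which_ppchunk; infer_instance

def pvWitness_numbering_which_ppchunk : List Int × List String :=
  ([1, 1, 0, 2, 2], ["of", "x", "y", "in", "z"])

def Spec_numbering_which_ppchunk (ppchunk_numbered_sent : List Int) (spacy_sent : List String)
    (out : List (List Int)) : Prop :=
  out = numbering_which_ppchunk_alt ppchunk_numbered_sent spacy_sent

instance (ppchunk_numbered_sent : List Int) (spacy_sent : List String) (out : List (List Int)) :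
    Decidable (Spec_numbering_which_ppchunk ppchunk_numbered_sent spacy_sent out) := by
  unfold Spec_numbering_which_ppchunk; infer_instance

-- ===== CLAIM (what is proved, stated in full; the proofs are below) =====
def Claim_equal_numbering_which_ppchunk : Prop := ∀ (ppchunk_numbered_sent : List Int) (spacy_sent : List String), Dom_numbering_which_ppchunk ppchunk_numbered_sent spacy_sent → Pre_numbering_which_ppchunk ppchunk_numbered_sent spacy_sent → Spec_numbering_which_ppchunk ppchunk_numbered_sent spacy_sent (numbering_which_ppchunk ppchunk_numbered_sent spacy_sent)

-- ===== LEMMAS AND PROOFS =====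

-- the prep number both programs assign at a marked position k
def pvVal (spacy : List String) (k : Nat) : Int :=
  (if pvPrepList.contains (spacy.getD k "") then
    (((PySem.List.index? pvPrepList (spacy.getD k "")).getD 0 : Nat) : Int)
  else 10) + 1

-- A's mark condition at position k (loop 1), in terms of List.getD
abbrev pvMarkCond (pp : List Int) (k : Nat) : Prop :=
  (k = 0 ∧ pp.getD 1 0 ≠ 0) ∨
    (0 < k ∧ pp.getD k 0 ≠ 0 ∧ pp.getD k 0 ≠ pp.getD (k - 1) 0)

def pvM (pp : List Int) (spacy : List String) (k : Nat) : Int :=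
  if pvMarkCond pp k then pvVal spacy k else 0

-- start index of the contiguous equal-value run of pp containing k
def pvRunStart (pp : List Int) : Nat → Nat
  | 0 => 0
  | k + 1 => if pp.getD (k + 1) 0 = pp.getD k 0 then pvRunStart pp k else k + 1

-- k lies in the same equal-value run as i (i ≤ k)
abbrev pvSameRun (pp : List Int) (i k : Nat) : Prop :=
  ∀ t, t < k → i ≤ t → pp.getD t 0 = pp.getD (t + 1) 0

-- one-hot row both programs build from a prep number
def pvOneHot (num : Int) : List Int :=
  if num = 0 then List.replicate 11 0
  else PySem.List.pySetD (List.replicate 11 (0 : Int)) (num - 1) 1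

theorem pvRunStart_le (pp : List Int) (k : Nat) : pvRunStart pp k ≤ k := by
  induction k with
  | zero => simp [pvRunStart]
  | succ k ih => simp only [pvRunStart]; split <;> omega

theorem pvRunStart_fix (pp : List Int) (k : Nat) :
    pvRunStart pp (pvRunStart pp k) = pvRunStart pp k := by
  induction k with
  | zero => simp [pvRunStart]
  | succ k ih => simp only [pvRunStart]; split <;> simp_all [pvRunStart]

theorem pvRunStart_eq_iff (pp : List Int) (i k : Nat) (h : i ≤ k) :
    pvRunStart pp k = pvRunStart pp i ↔ pvSameRun pp i k := by
  induction k with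
  | zero =>
    have hi : i = 0 := by omega
    subst hi
    constructor
    · intro _ t ht hit; omega
    · intro _; rfl
  | succ k ih =>
    rcases Nat.eq_or_lt_of_le h with rfl | hlt
    · constructor
      · intro _ t ht hit; omega
      · intro _; rfl
    · have hik : i ≤ k := by omega
      simp only [pvRunStart]
      split
      · rename_i heq
        rw [ih hik]
        constructor
        · intro hs t ht hit
          rcases Nat.lt_or_ge t k with h' | h'
          · exact hs t h' hit
          · have : t = k := by omega
            subst this; omega
        · intro hs t ht hit; exact hs t (by omega) hit
      · rename_i hne
        constructor
        · intro hk1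
          have := pvRunStart_le pp i
          omega
        · intro hs
          exact absurd (hs k (by omega) hik).symm hne

theorem pvM_eq_zero_of_inner (pp : List Int) (spacy : List String) (k : Nat)
    (h : pvRunStart pp k < k) : pvM pp spacy k = 0 := by
  cases k with
  | zero => simp [pvRunStart] at h
  | succ k =>
    have heq : pp.getD (k + 1) 0 = pp.getD k 0 := by
      by_contra hne
      rw [pvRunStart, if_neg hne] at h
      omega
    rw [pvM, if_neg]
    rintro (⟨h0, _⟩ | ⟨_, _, hne⟩)
    · omega
    · apply hne
      show pp.getD (k + 1) 0 = pp.getD (k + 1 - 1) 0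
      simpa using heq

-- the value A writes at a marked position equals pvVal
theorem pvTbl_getD_mem (tok : String) (hm : tok ∈ pvPrepList) :
    (make_lookup_table pvPrepList).getD tok 0 =
      (((PySem.List.index? pvPrepList tok).getD 0 : Nat) : Int) := by
  fin_cases hm <;> decide

theorem pvValA_eq (spacy : List String) (k : Nat) :
    (if pvPrepList.contains (spacy.getD k "") then
      (make_lookup_table pvPrepList).getD (spacy.getD k "") 0 + 1
    else (make_lookup_table pvPrepList).getD "unknown" 0 + 1) = pvVal spacy k := by
  unfold pvVal
  by_cases hc : pvPrepList.contains (spacy.getD k "")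
  · rw [if_pos hc, if_pos hc]
    have hm : spacy.getD k "" ∈ pvPrepList := by
      simpa using hc
    rw [pvTbl_getD_mem _ hm]
  · rw [if_neg hc, if_neg hc]
    decide

theorem pvGetD_set (l : List Int) (i k : Nat) (v : Int) :
    (l.set i v).getD k 0 = if i = k ∧ i < l.length then v else l.getD k 0 := by
  by_cases hik : i = k
  · subst hik
    by_cases hl : i < l.length
    · simp [List.getD_eq_getElem?_getD, hl]
    · simp only [List.getD_eq_getElem?_getD]
      rw [List.set_eq_of_length_le (by omega)]
      simp [hl]
  · simp [List.getD_eq_getElem?_getD, List.getElem?_set_ne hik, hik]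

theorem pvPyGetD_nat (l : List Int) (m : Nat) :
    PySem.List.pyGetD l (m : Int) 0 = l.getD m 0 := by
  simp [List.getD_eq_getElem?_getD]

theorem pvPyGetDs_nat (l : List String) (m : Nat) :
    PySem.List.pyGetD l (m : Int) "" = l.getD m "" := by
  simp [List.getD_eq_getElem?_getD]

theorem pvLoop1_spec (pp : List Int) (spacy : List String) (l : List Int) (t : Nat)
    (w : List Int) (hl : ∀ j : Nat, l[j]? = pp[t + j]?) (hw : w.length = pp.length) :
    (pvLoop1 pp spacy (make_lookup_table pvPrepList) l t w).length = pp.length ∧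
    ∀ k : Nat, (pvLoop1 pp spacy (make_lookup_table pvPrepList) l t w).getD k 0 =
      if t ≤ k ∧ k < pp.length ∧ pvMarkCond pp k then pvVal spacy k else w.getD k 0 := by
  induction l generalizing t w with
  | nil =>
    refine ⟨hw, fun k => ?_⟩
    have hn : pp.length ≤ t := by
      have h0 := (hl 0).symm
      rw [Nat.add_zero, List.getElem?_nil, List.getElem?_eq_none_iff] at h0
      exact h0
    rw [if_neg]
    · simp [pvLoop1]
    · rintro ⟨h1, h2, _⟩; omega
  | cons num rest ih =>
    have h0 : pp[t]? = some num := by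
      have := hl 0
      rw [Nat.add_zero, List.getElem?_cons_zero] at this
      exact this.symm
    obtain ⟨ht, _⟩ := List.getElem?_eq_some_iff.mp h0
    have hnum : pp.getD t 0 = num := by
      rw [List.getD_eq_getElem?_getD, h0]; rfl
    have hstep : pvLoop1 pp spacy (make_lookup_table pvPrepList) (num :: rest) t w =
        pvLoop1 pp spacy (make_lookup_table pvPrepList) rest (t + 1)
          (if pvMarkCond pp t then w.set t (pvVal spacy t) else w) := by
      rw [pvLoop1]
      simp only [pvPyGetD_nat, pvPyGetDs_nat, PySem.List.pySetD_natCast]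
      congr 1
      rcases Nat.eq_zero_or_pos t with rfl | htpos
      · -- outer if (A's second branch) needs t ≠ 0: false here
        rw [if_neg (by rintro ⟨hz, _⟩; exact hz rfl)]
        by_cases hc : pp.getD (0 + 1) 0 ≠ 0
        · rw [if_pos ⟨rfl, hc⟩, if_pos (Or.inl ⟨rfl, hc⟩), ← pvValA_eq spacy 0]
          by_cases hct : pvPrepList.contains (spacy.getD 0 "") = true
          · rw [if_pos hct, if_pos hct]
          · rw [if_neg hct, if_neg hct]
        · have hm : ¬ pvMarkCond pp 0 := by
            rintro (⟨_, hx⟩ | ⟨hz, _⟩)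
            · exact hc hx
            · omega
          rw [if_neg (fun hx => hc hx.2), if_neg hm]
      · have h1 : ¬ ((t : Nat) = 0 ∧ pp.getD (t + 1) 0 ≠ 0) := by rintro ⟨hz, _⟩; omega
        rw [if_neg h1]
        by_cases hc : num ≠ 0 ∧ pp.getD t 0 ≠ pp.getD (t - 1) 0
        · rw [if_pos ⟨by omega, hc.1, hc.2⟩,
              if_pos (Or.inr ⟨htpos, by rw [hnum]; exact hc.1, hc.2⟩), ← pvValA_eq spacy t]
          by_cases hct : pvPrepList.contains (spacy.getD t "") = true
          · rw [if_pos hct, if_pos hct]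
          · rw [if_neg hct, if_neg hct]
        · have hm : ¬ pvMarkCond pp t := by
            rintro (⟨hz, _⟩ | ⟨_, hx1, hx2⟩)
            · omega
            · exact hc ⟨by rwa [hnum] at hx1, hx2⟩
          rw [if_neg (by rintro ⟨_, hx1, hx2⟩; exact hc ⟨hx1, hx2⟩), if_neg hm]
    rw [hstep]
    have hw' : (if pvMarkCond pp t then w.set t (pvVal spacy t) else w).length = pp.length := by
      split <;> simp [hw]
    obtain ⟨ihl, ihg⟩ := ih (t + 1)
      (if pvMarkCond pp t then w.set t (pvVal spacy t) else w)
      (fun j => by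
        have := hl (j + 1)
        rw [show t + (j + 1) = t + 1 + j by omega] at this
        simpa using this) hw'
    refine ⟨ihl, fun k => ?_⟩
    rw [ihg k]
    have hwk : (if pvMarkCond pp t then w.set t (pvVal spacy t) else w).getD k 0 =
        if t = k ∧ pvMarkCond pp t then pvVal spacy t else w.getD k 0 := by
      split
      · rw [pvGetD_set]
        rename_i hmc
        by_cases hk : t = k
        · rw [if_pos ⟨hk, by omega⟩, if_pos ⟨hk, hmc⟩]
        · rw [if_neg (by rintro ⟨h, _⟩; exact hk h), if_neg (by rintro ⟨h, _⟩; exact hk h)]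
      · rename_i hmc
        rw [if_neg (by rintro ⟨_, h⟩; exact hmc h)]
    rw [hwk]
    by_cases hk : t = k
    · subst hk
      rw [if_neg (by rintro ⟨a, _, _⟩; omega)]
      by_cases hmc : pvMarkCond pp t
      · rw [if_pos ⟨rfl, hmc⟩, if_pos ⟨le_refl t, ht, hmc⟩]
      · rw [if_neg (by rintro ⟨_, h⟩; exact hmc h), if_neg (by rintro ⟨_, _, h⟩; exact hmc h)]
    · have hi : (if t = k ∧ pvMarkCond pp t then pvVal spacy t else w.getD k 0) = w.getD k 0 :=
        if_neg (by rintro ⟨h, _⟩; exact hk h)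
      rw [hi]
      rcases Nat.lt_or_ge k t with hlt | hge
      · rw [if_neg (by rintro ⟨a, _, _⟩; omega), if_neg (by rintro ⟨a, _, _⟩; omega)]
      · by_cases hc2 : k < pp.length ∧ pvMarkCond pp k
        · rw [if_pos ⟨by omega, hc2.1, hc2.2⟩, if_pos ⟨hge, hc2.1, hc2.2⟩]
        · rw [if_neg (by rintro ⟨_, a, b⟩; exact hc2 ⟨a, b⟩),
              if_neg (by rintro ⟨_, a, b⟩; exact hc2 ⟨a, b⟩)]

theorem pvFill_length (pp : List Int) (n : Nat) (num : Int) (j : Nat) (w : List Int) :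
    (pvFill pp n num j w).length = w.length := by
  fun_induction pvFill pp n num j w <;> simp_all [PySem.List.pySetD_natCast]

theorem pvFill_getD (pp : List Int) (n : Nat) (num : Int) (j : Nat) (w : List Int)
    (hw : w.length = n) (k : Nat) :
    (pvFill pp n num j w).getD k 0 =
      if j ≤ k ∧ k < n ∧ j + 1 < n ∧ pp.getD j 0 = pp.getD (j + 1) 0 ∧ pvSameRun pp j k then
        num
      else w.getD k 0 := by
  suffices h : ∀ (d j : Nat) (w : List Int), n - j = d → w.length = n → ∀ k : Nat,
      (pvFill pp n num j w).getD k 0 =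
        if j ≤ k ∧ k < n ∧ j + 1 < n ∧ pp.getD j 0 = pp.getD (j + 1) 0 ∧ pvSameRun pp j k then
          num
        else w.getD k 0 by
    exact h (n - j) j w rfl hw k
  intro d
  induction d with
  | zero =>
    intro j w hd hww k
    rw [pvFill, dif_neg (by omega : ¬ j < n), if_neg (by rintro ⟨h1, h2, _⟩; omega)]
  | succ d ihd =>
    intro j w hd hww k
    rw [pvFill, dif_pos (by omega : j < n)]
    simp only [pvPyGetD_nat, PySem.List.pySetD_natCast]
    by_cases hlast : j = n - 1
    · rw [if_pos hlast, ihd (j + 1) w (by omega) hww k,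
        if_neg (by rintro ⟨a, b, _⟩; omega), if_neg (by rintro ⟨_, _, c, _⟩; omega)]
    · rw [if_neg hlast]
      have hj1 : j + 1 < n := by omega
      by_cases heq : pp.getD j 0 = pp.getD (j + 1) 0
      · rw [if_pos heq,
          ihd (j + 1) ((w.set j num).set (j + 1) num) (by omega) (by simp [hww]) k]
        rcases lt_trichotomy k j with hkj | rfl | hkj
        · -- k < j: untouched
          rw [if_neg (by rintro ⟨a, _⟩; omega), if_neg (by rintro ⟨a, _⟩; omega),
            pvGetD_set, if_neg (by rintro ⟨h, _⟩; omega),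
            pvGetD_set, if_neg (by rintro ⟨h, _⟩; omega)]
        · -- k = j: written by the first set
          rw [if_neg (by rintro ⟨a, _⟩; omega),
            if_pos ⟨le_refl _, by omega, hj1, heq, by rintro t ht hjt; omega⟩,
            pvGetD_set, if_neg (by rintro ⟨h, _⟩; omega),
            pvGetD_set, if_pos ⟨rfl, by omega⟩]
        · rcases Nat.eq_or_lt_of_le hkj with rfl | hk2
          · -- k = j + 1
            have hsr : pvSameRun pp j (j + 1) := by
              intro t ht hjt
              have : t = j := by omega
              subst this; exact heq
            by_cases hL : j + 1 ≤ j + 1 ∧ j + 1 < n ∧ j + 1 + 1 < n ∧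
                pp.getD (j + 1) 0 = pp.getD (j + 1 + 1) 0 ∧ pvSameRun pp (j + 1) (j + 1)
            · rw [if_pos hL, if_pos ⟨by omega, by omega, hj1, heq, hsr⟩]
            · rw [if_neg hL, if_pos ⟨by omega, by omega, hj1, heq, hsr⟩,
                pvGetD_set, if_pos ⟨rfl, by simp [hww]; omega⟩]
          · -- j + 1 < k
            have hw2 : ((w.set j num).set (j + 1) num).getD k 0 = w.getD k 0 := by
              rw [pvGetD_set, if_neg (by rintro ⟨h, _⟩; omega),
                pvGetD_set, if_neg (by rintro ⟨h, _⟩; omega)]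
            rw [hw2]
            by_cases hR : k < n ∧ pvSameRun pp (j + 1) k
            · rw [if_pos ⟨by omega, hR.1, by omega,
                  hR.2 (j + 1) (by omega) (by omega), hR.2⟩,
                if_pos ⟨by omega, hR.1, hj1, heq, by
                  intro t ht hjt
                  rcases Nat.eq_or_lt_of_le hjt with rfl | h'
                  · exact heq
                  · exact hR.2 t ht (by omega)⟩]
            · rw [if_neg (by
                  rintro ⟨_, hb, _, _, hs⟩
                  exact hR ⟨hb, hs⟩),
                if_neg (by
                  rintro ⟨_, hb, _, _, hs⟩
                  exact hR ⟨hb, fun t ht hjt => hs t ht (by omega)⟩)]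
      · rw [if_neg heq, if_neg (by rintro ⟨_, _, _, he, _⟩; exact heq he)]

theorem pvLoop2_spec (pp : List Int) (spacy : List String) (i : Nat) (w : List Int)
    (hw : w.length = pp.length)
    (hinv : ∀ k, k < pp.length → w.getD k 0 =
      if pvRunStart pp k < i then pvM pp spacy (pvRunStart pp k) else pvM pp spacy k) :
    pvLoop2 pp pp.length i w =
      (List.range pp.length).map (fun k => pvM pp spacy (pvRunStart pp k)) := by
  suffices h : ∀ (d i : Nat) (w : List Int), pp.length - i = d → w.length = pp.length →
      (∀ k, k < pp.length → w.getD k 0 =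
        if pvRunStart pp k < i then pvM pp spacy (pvRunStart pp k) else pvM pp spacy k) →
      pvLoop2 pp pp.length i w =
        (List.range pp.length).map (fun k => pvM pp spacy (pvRunStart pp k)) by
    exact h _ i w rfl hw hinv
  intro d
  induction d with
  | zero =>
    intro i w hd hww hinv
    rw [pvLoop2, dif_neg (by omega : ¬ i < pp.length)]
    apply List.ext_getElem
    · simp [hww]
    · intro k hk1 hk2
      have hkn : k < pp.length := by omega
      rw [List.getElem_map, List.getElem_range]
      have hv := hinv k hkn
      rw [if_pos (by have := pvRunStart_le pp k; omega)] at hv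
      rw [← hv, List.getD_eq_getElem?_getD, List.getElem?_eq_getElem hk1]
      rfl
  | succ d ihd =>
    intro i w hd hww hinv
    have hin : i < pp.length := by omega
    rw [pvLoop2, dif_pos hin]
    have hwi : PySem.List.pyGetD w (i : Int) 0 = pvM pp spacy (pvRunStart pp i) := by
      rw [pvPyGetD_nat, hinv i hin]
      rcases Nat.lt_or_ge (pvRunStart pp i) i with h | h
      · rw [if_pos h]
      · have he : pvRunStart pp i = i := by have := pvRunStart_le pp i; omega
        rw [if_neg (by omega), he]
    rw [hwi]
    by_cases hz : pvM pp spacy (pvRunStart pp i) ≠ 0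
    · rw [if_pos hz]
      apply ihd (i + 1) _ (by omega) (by rw [pvFill_length]; exact hww)
      intro k hk
      rw [pvFill_getD pp pp.length _ i _ hww k]
      by_cases hW : i ≤ k ∧ k < pp.length ∧ i + 1 < pp.length ∧
          pp.getD i 0 = pp.getD (i + 1) 0 ∧ pvSameRun pp i k
      · rw [if_pos hW]
        have hrs : pvRunStart pp k = pvRunStart pp i :=
          (pvRunStart_eq_iff pp i k hW.1).mpr hW.2.2.2.2
        rw [hrs, if_pos (by have := pvRunStart_le pp i; omega)]
      · rw [if_neg hW, hinv k hk]
        rcases Nat.lt_trichotomy (pvRunStart pp k) i with h | he | h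
        · rw [if_pos h, if_pos (by omega)]
        · have hrsi : pvRunStart pp i = i := by rw [← he, pvRunStart_fix]
          have hik : i ≤ k := by have := pvRunStart_le pp k; omega
          rcases Nat.eq_or_lt_of_le hik with rfl | hik'
          · rw [if_neg (by omega), if_pos (by omega), he]
          · exfalso
            apply hW
            have hsr : pvSameRun pp i k := by
              rw [← pvRunStart_eq_iff pp i k hik, he, hrsi]
            exact ⟨hik, hk, by omega, hsr i (by omega) (le_refl i), hsr⟩
        · rw [if_neg (by omega), if_neg (by omega)]
    · rw [if_neg hz]
      apply ihd (i + 1) w (by omega) hww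
      intro k hk
      rw [hinv k hk]
      rcases Nat.lt_trichotomy (pvRunStart pp k) i with h | he | h
      · rw [if_pos h, if_pos (by omega)]
      · have hrsi : pvRunStart pp i = i := by rw [← he, pvRunStart_fix]
        have hik : i ≤ k := by have := pvRunStart_le pp k; omega
        rcases Nat.eq_or_lt_of_le hik with rfl | hik'
        · rw [if_neg (by omega), if_pos (by omega), he]
        · have h0 : pvM pp spacy i = 0 := by
            have h0' := not_not.mp hz
            rwa [hrsi] at h0'
          rw [if_neg (by omega), if_pos (by omega), he,
            pvM_eq_zero_of_inner pp spacy k (by omega), h0]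
      · rw [if_neg (by omega), if_neg (by omega)]
theorem pvLoop3_spec (w : List Int) :
    pvLoop3 (make_lookup_table pvPrepList) w = w.map pvOneHot := by
  unfold pvLoop3
  have hb : (fun (acc : List (List Int)) (p : Int × Int) =>
      let feat := List.replicate (make_lookup_table pvPrepList).size (0 : Int)
      if p.2 = 0 then acc ++ [feat] else acc ++ [PySem.List.pySetD feat (p.2 - 1) 1]) =
      fun acc p => acc ++ [pvOneHot p.2] := by
    funext acc p
    show (if p.2 = 0 then acc ++ [List.replicate (make_lookup_table pvPrepList).size (0 : Int)]
        else acc ++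
          [PySem.List.pySetD (List.replicate (make_lookup_table pvPrepList).size (0 : Int))
            (p.2 - 1) 1]) = acc ++ [pvOneHot p.2]
    have hs : (make_lookup_table pvPrepList).size = 11 := by decide
    rw [hs, pvOneHot]
    split <;> rfl
  rw [hb, PySem.List.foldl_append_singleton_eq_map, List.nil_append,
    show (fun (p : Int × Int) => pvOneHot p.2) =
      pvOneHot ∘ (fun p : Int × Int => p.2) from rfl,
    ← List.map_map, PySem.List.map_snd_enumerate]

theorem pvAltStep_cur (pp : List Int) (spacy : List String) (t : Nat) (ht : t < pp.length)
    (cur : Int) (out : List (List Int))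
    (hcur : cur = if t = 0 then 0 else pvM pp spacy (pvRunStart pp (t - 1))) :
    pvAltStep pp spacy pp.length (cur, out) t =
      (pvM pp spacy (pvRunStart pp t),
        out ++ [pvOneHot (pvM pp spacy (pvRunStart pp t))]) := by
  have hc : (if ¬ (0 < t ∧ PySem.List.pyGetD pp (t : Int) 0 =
        PySem.List.pyGetD pp ((t - 1 : Nat) : Int) 0) then
      if (t = 0 ∧ 1 < pp.length ∧ PySem.List.pyGetD pp ((1 : Nat) : Int) 0 ≠ 0) ∨
          (0 < t ∧ PySem.List.pyGetD pp (t : Int) 0 ≠ 0) then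
        (if (["for", "to", "into", "with", "upon", "of", "as", "by", "on", "in",
              "unknown"] : List String).contains (PySem.List.pyGetD spacy (t : Int) "") then
          (((PySem.List.index?
              ["for", "to", "into", "with", "upon", "of", "as", "by", "on", "in",
                "unknown"] (PySem.List.pyGetD spacy (t : Int) "")).getD 0 : Nat) : Int)
        else 10) + 1
      else 0
    else cur) = pvM pp spacy (pvRunStart pp t) := by
    simp only [pvPyGetD_nat, pvPyGetDs_nat]
    cases t with
    | zero =>
      rw [if_pos (by rintro ⟨h0, _⟩; omega)]
      have hrs : pvRunStart pp 0 = 0 := rfl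
      rw [hrs]
      by_cases hne : pp.getD 1 0 ≠ 0
      · have hn1 : 1 < pp.length := by
          by_contra hle
          exact hne (List.getD_eq_default _ _ (by omega))
        rw [if_pos (Or.inl ⟨rfl, hn1, hne⟩), pvM, if_pos (Or.inl ⟨rfl, hne⟩)]
        rw [pvVal, pvPrepList]
      · rw [if_neg (by
            rintro (⟨_, _, hx⟩ | ⟨hz, _⟩)
            · exact hne hx
            · omega),
          pvM, if_neg (by
            rintro (⟨_, hx⟩ | ⟨hz, _⟩)
            · exact hne hx
            · omega)]
    | succ t' =>
      have hsub : t' + 1 - 1 = t' := by omega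
      rw [hsub] at hcur ⊢
      by_cases heq : pp.getD (t' + 1) 0 = pp.getD t' 0
      · rw [if_neg (not_not_intro ⟨by omega, heq⟩), hcur,
          if_neg (by omega)]
        have hrs : pvRunStart pp (t' + 1) = pvRunStart pp t' := by
          rw [pvRunStart, if_pos heq]
        rw [hrs]
      · rw [if_pos (by rintro ⟨_, hx⟩; exact heq hx)]
        have hrs : pvRunStart pp (t' + 1) = t' + 1 := by
          rw [pvRunStart, if_neg heq]
        rw [hrs]
        by_cases hne : pp.getD (t' + 1) 0 ≠ 0
        · rw [if_pos (Or.inr ⟨by omega, hne⟩), pvM,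
            if_pos (Or.inr ⟨by omega, hne, by rw [hsub]; exact heq⟩)]
          rw [pvVal, pvPrepList]
        · rw [if_neg (by
              rintro (⟨hz, _⟩ | ⟨_, hx⟩)
              · omega
              · exact hne hx),
            pvM, if_neg (by
              rintro (⟨hz, _⟩ | ⟨_, hx, _⟩)
              · omega
              · exact hne hx)]
  have hstep : pvAltStep pp spacy pp.length (cur, out) t =
      ((if ¬ (0 < t ∧ PySem.List.pyGetD pp (t : Int) 0 =
            PySem.List.pyGetD pp ((t - 1 : Nat) : Int) 0) then
          if (t = 0 ∧ 1 < pp.length ∧ PySem.List.pyGetD pp ((1 : Nat) : Int) 0 ≠ 0) ∨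
              (0 < t ∧ PySem.List.pyGetD pp (t : Int) 0 ≠ 0) then
            (if (["for", "to", "into", "with", "upon", "of", "as", "by", "on", "in",
                  "unknown"] : List String).contains (PySem.List.pyGetD spacy (t : Int) "") then
              (((PySem.List.index?
                  ["for", "to", "into", "with", "upon", "of", "as", "by", "on", "in",
                    "unknown"] (PySem.List.pyGetD spacy (t : Int) "")).getD 0 : Nat) : Int)
            else 10) + 1
          else 0
        else cur),
        out ++ [if (if ¬ (0 < t ∧ PySem.List.pyGetD pp (t : Int) 0 =
            PySem.List.pyGetD pp ((t - 1 : Nat) : Int) 0) then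
          if (t = 0 ∧ 1 < pp.length ∧ PySem.List.pyGetD pp ((1 : Nat) : Int) 0 ≠ 0) ∨
              (0 < t ∧ PySem.List.pyGetD pp (t : Int) 0 ≠ 0) then
            (if (["for", "to", "into", "with", "upon", "of", "as", "by", "on", "in",
                  "unknown"] : List String).contains (PySem.List.pyGetD spacy (t : Int) "") then
              (((PySem.List.index?
                  ["for", "to", "into", "with", "upon", "of", "as", "by", "on", "in",
                    "unknown"] (PySem.List.pyGetD spacy (t : Int) "")).getD 0 : Nat) : Int)
            else 10) + 1
          else 0
        else cur) ≠ 0 then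
          PySem.List.pySetD (List.replicate 11 (0 : Int))
            ((if ¬ (0 < t ∧ PySem.List.pyGetD pp (t : Int) 0 =
                PySem.List.pyGetD pp ((t - 1 : Nat) : Int) 0) then
              if (t = 0 ∧ 1 < pp.length ∧ PySem.List.pyGetD pp ((1 : Nat) : Int) 0 ≠ 0) ∨
                  (0 < t ∧ PySem.List.pyGetD pp (t : Int) 0 ≠ 0) then
                (if (["for", "to", "into", "with", "upon", "of", "as", "by", "on", "in",
                      "unknown"] : List String).contains
                    (PySem.List.pyGetD spacy (t : Int) "") then
                  (((PySem.List.index?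
                      ["for", "to", "into", "with", "upon", "of", "as", "by", "on", "in",
                        "unknown"] (PySem.List.pyGetD spacy (t : Int) "")).getD 0 : Nat) : Int)
                else 10) + 1
              else 0
            else cur) - 1) 1
        else List.replicate 11 (0 : Int)]) := rfl
  rw [hstep, hc]
  have hvec : (if pvM pp spacy (pvRunStart pp t) ≠ 0 then
      PySem.List.pySetD (List.replicate 11 (0 : Int)) (pvM pp spacy (pvRunStart pp t) - 1) 1
    else List.replicate 11 (0 : Int)) = pvOneHot (pvM pp spacy (pvRunStart pp t)) := by
    rw [pvOneHot]
    by_cases hz : pvM pp spacy (pvRunStart pp t) = 0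
    · rw [if_neg (not_not_intro hz), if_pos hz]
    · rw [if_pos hz, if_neg hz]
  rw [hvec]

theorem pvAltAux (pp : List Int) (spacy : List String) : ∀ t, t ≤ pp.length →
    (List.range t).foldl (pvAltStep pp spacy pp.length) ((0 : Int), ([] : List (List Int))) =
      ((if t = 0 then (0 : Int) else pvM pp spacy (pvRunStart pp (t - 1))),
        (List.range t).map (fun k => pvOneHot (pvM pp spacy (pvRunStart pp k)))) := by
  intro t
  induction t with
  | zero => intro _; simp
  | succ t ih =>
    intro h
    rw [List.range_succ, List.foldl_append, List.foldl_cons, List.foldl_nil, ih (by omega),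
      pvAltStep_cur pp spacy t (by omega) _ _ rfl]
    simp

theorem pvAlt_spec (pp : List Int) (spacy : List String) :
    numbering_which_ppchunk_alt pp spacy =
      (List.range pp.length).map (fun k => pvOneHot (pvM pp spacy (pvRunStart pp k))) := by
  unfold numbering_which_ppchunk_alt
  rw [pvAltAux pp spacy pp.length (le_refl _)]

-- ===== VERDICT (by name: the statement is the Claim_ definition above) =====
theorem numbering_which_ppchunk_spec : Claim_equal_numbering_which_ppchunk := by
  intro pp spacy _ _
  show numbering_which_ppchunk pp spacy = numbering_which_ppchunk_alt pp spacy
  obtain ⟨h1l, h1g⟩ := pvLoop1_spec pp spacy pp 0 (List.replicate pp.length 0)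
    (fun j => by simp) (by simp)
  have hInv : ∀ k, k < pp.length →
      (pvLoop1 pp spacy (make_lookup_table pvPrepList) pp 0
        (List.replicate pp.length 0)).getD k 0 =
      if pvRunStart pp k < 0 then pvM pp spacy (pvRunStart pp k) else pvM pp spacy k := by
    intro k hk
    rw [h1g k, if_neg (by omega : ¬ pvRunStart pp k < 0), pvM]
    by_cases hmc : pvMarkCond pp k
    · rw [if_pos ⟨by omega, hk, hmc⟩, if_pos hmc]
    · rw [if_neg (by rintro ⟨_, _, h⟩; exact hmc h), if_neg hmc]
      simp [List.getD_eq_getElem?_getD, hk]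
  show pvLoop3 (make_lookup_table pvPrepList)
      (pvLoop2 pp pp.length 0
        (pvLoop1 pp spacy (make_lookup_table pvPrepList) pp 0
          (List.replicate pp.length 0))) =
    numbering_which_ppchunk_alt pp spacy
  rw [pvLoop2_spec pp spacy 0 _ h1l hInv, pvLoop3_spec, pvAlt_spec, List.map_map]
  rfl
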